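-- pv_equiv track=rewrite | github.com/Jhedie/Comfortable_Python | CodingBat/biggest_number_index.py | biggest_number
-- ===== SOURCE A (Python) =====
-- def biggest_number(List, position1):
--     if position1 == len(List)-1:
--         return position1
--     else:
--         #position2 which we would compare with position 1
--         position2 = biggest_number(List, position1 + 1)
--         #if position2 is bigger we maintain position2
--         if List[position2] > List[position1]:
--             return position2
--         #otherwise position1 is maintained
--         else:
--             return position1
-- ===== SOURCE B (Python) =====
-- def biggest_number(List, position1):
--     best = position1
--     for i in range(position1 + 1, len(List)):
--         if List[i] > List[best]:
--             best = i
--     return best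
-- ===== Notes on version B (the rewrite author's own statement) =====
-- stated objective: faster
-- what changed: Replaced the tail-to-head recursion (one Python stack frame per remaining element) by a single iterative left-to-right scan keeping the index of the first maximum.
import Mathlib
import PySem

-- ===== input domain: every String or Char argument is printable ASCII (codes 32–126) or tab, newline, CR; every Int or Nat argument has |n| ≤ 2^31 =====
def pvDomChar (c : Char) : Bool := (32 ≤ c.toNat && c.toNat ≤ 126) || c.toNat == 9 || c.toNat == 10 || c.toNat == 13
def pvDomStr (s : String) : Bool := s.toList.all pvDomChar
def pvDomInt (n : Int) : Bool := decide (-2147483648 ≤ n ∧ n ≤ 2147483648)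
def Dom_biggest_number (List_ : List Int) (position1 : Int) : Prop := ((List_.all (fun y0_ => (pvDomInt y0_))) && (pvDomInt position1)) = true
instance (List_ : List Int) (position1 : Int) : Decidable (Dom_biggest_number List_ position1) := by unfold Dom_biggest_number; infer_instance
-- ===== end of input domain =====

-- B replaces A's recursion by an iterative linear scan (O(1) space, no recursion overhead); return value only.

-- ===== PORT A =====
-- fuel counts the remaining recursive calls; inside Pre_ it is never exhausted
-- (for position1 beyond len-1 the Python recursion never terminates, which Pre_ excludes).
def bnAux (List_ : List Int) (position1 : Int) (fuel : Nat) : Int :=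
  if position1 = (List_.length : Int) - 1 then position1
  else
    match fuel with
    | 0 => position1
    | Nat.succ f =>
      let position2 := bnAux List_ (position1 + 1) f
      if PySem.List.pyGetD List_ position1 0 < PySem.List.pyGetD List_ position2 0 then position2
      else position1

def biggest_number (List_ : List Int) (position1 : Int) : Int :=
  bnAux List_ position1 ((List_.length : Int) - 1 - position1).toNat

-- ===== PORT B =====
def biggest_number_alt (List_ : List Int) (position1 : Int) : Int :=
  (PySem.List.pyRange (position1 + 1) (List_.length : Int) 1).foldl
    (fun best i =>
      if PySem.List.pyGetD List_ best 0 < PySem.List.pyGetD List_ i 0 then i else best)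
    position1

-- ===== PRECONDITION & SPEC =====
-- Pre_: position1 is a valid (possibly negative) index, or equals len-1 (A's immediate-return
-- case, which also covers the empty list with its last-index argument); outside this, Python A
-- raises (IndexError, or RecursionError when position1 is past the end).
def Pre_biggest_number (List_ : List Int) (position1 : Int) : Prop :=
  PySem.Raise.InRange List_.length position1 ∨ position1 = (List_.length : Int) - 1
instance (List_ : List Int) (position1 : Int) : Decidable (Pre_biggest_number List_ position1) := by
  unfold Pre_biggest_number; infer_instance

def pvWitness_biggest_number : List Int × Int := ([1, 3, 2], 0)

def Spec_biggest_number (List_ : List Int) (position1 : Int) (out : Int) : Prop :=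
  out = biggest_number_alt List_ position1
instance (List_ : List Int) (position1 : Int) (out : Int) : Decidable (Spec_biggest_number List_ position1 out) := by
  unfold Spec_biggest_number; infer_instance

-- ===== CLAIM (what is proved, stated in full; the proofs are below) =====
def Claim_equal_biggest_number : Prop := ∀ (List_ : List Int) (position1 : Int), Dom_biggest_number List_ position1 → Pre_biggest_number List_ position1 → Spec_biggest_number List_ position1 (biggest_number List_ position1)

-- ===== LEMMAS AND PROOFS =====

-- the value at the index kept by the scan never decreases
theorem bn_fold_mono (g : Int → Int) :
    ∀ (r : List Int) (a : Int),
      g a ≤ g (r.foldl (fun b i => if g b < g i then i else b) a) := by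
  intro r
  induction r with
  | nil => intro a; simp
  | cons x r ih =>
    intro a
    simp only [List.foldl_cons]
    by_cases h : g a < g x
    · simp only [if_pos h]
      exact le_of_lt (lt_of_lt_of_le h (ih x))
    · simp only [if_neg h]
      exact ih a

-- starting the scan from a no-larger seed: the result is either kept or beaten by a
theorem bn_fold_swap (g : Int → Int) :
    ∀ (r : List Int) (a b : Int), g b ≤ g a →
      r.foldl (fun b i => if g b < g i then i else b) a =
        (if g a < g (r.foldl (fun b i => if g b < g i then i else b) b)
         then r.foldl (fun b i => if g b < g i then i else b) b else a) := by
  intro r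
  induction r with
  | nil =>
    intro a b hba
    simp only [List.foldl_nil]
    rw [if_neg (not_lt.mpr hba)]
  | cons x r ih =>
    intro a b hba
    simp only [List.foldl_cons]
    by_cases hx : g a < g x
    · have hbx : g b < g x := lt_of_le_of_lt hba hx
      rw [if_pos hx, if_pos hbx]
      have hm := bn_fold_mono g r x
      rw [if_pos (lt_of_lt_of_le hx hm)]
    · rw [if_neg hx]
      by_cases hbx : g b < g x
      · rw [if_pos hbx]
        exact ih a x (not_lt.mp hx)
      · rw [if_neg hbx]
        exact ih a b hba

theorem bnAux_eq_fold (List_ : List Int) :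
    ∀ (fuel : Nat) (p : Int), p ≤ (List_.length : Int) - 1 →
      ((List_.length : Int) - 1 - p).toNat ≤ fuel →
      bnAux List_ p fuel = biggest_number_alt List_ p := by
  intro fuel
  induction fuel with
  | zero =>
    intro p hle hfuel
    have hp : p = (List_.length : Int) - 1 := by omega
    rw [bnAux, if_pos hp]
    unfold biggest_number_alt
    rw [PySem.List.pyRange_one_eq_nil (by omega)]
    simp
  | succ f ih =>
    intro p hle hfuel
    by_cases hp : p = (List_.length : Int) - 1
    · rw [bnAux, if_pos hp]
      unfold biggest_number_alt
      rw [PySem.List.pyRange_one_eq_nil (by omega)]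
      simp
    · have hlt : p < (List_.length : Int) - 1 := lt_of_le_of_ne hle hp
      rw [bnAux, if_neg hp]
      simp only []
      rw [ih (p + 1) (by omega) (by omega)]
      unfold biggest_number_alt
      rw [PySem.List.pyRange_one_cons (by omega : p + 1 < (List_.length : Int))]
      simp only [List.foldl_cons]
      by_cases hx : PySem.List.pyGetD List_ p 0 < PySem.List.pyGetD List_ (p + 1) 0
      · rw [if_pos hx]
        have hm := bn_fold_mono (fun i => PySem.List.pyGetD List_ i 0)
          (PySem.List.pyRange (p + 1 + 1) (List_.length : Int) 1) (p + 1)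
        exact if_pos (lt_of_lt_of_le hx hm)
      · rw [if_neg hx]
        exact (bn_fold_swap (fun i => PySem.List.pyGetD List_ i 0) _ p (p + 1) (not_lt.mp hx)).symm

-- ===== VERDICT (by name: the statement is the Claim_ definition above) =====
theorem biggest_number_spec : Claim_equal_biggest_number := by
  intro List_ position1 _ hpre
  unfold Spec_biggest_number biggest_number
  apply bnAux_eq_fold
  · rcases hpre with h | h
    · rcases h with ⟨_, h2⟩; omega
    · omega
  · exact le_refl _
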